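-- pv_equiv track=rewrite | github.com/JoshWardUK/F1Project | schema_change.py | compare_field_maps
-- ===== SOURCE A (Python) =====
-- def compare_field_maps(old, new):
--     old_keys, new_keys = set(old), set(new)
--
--     added = {k: new[k] for k in new_keys - old_keys}
--     removed = {k: old[k] for k in old_keys - new_keys}
--     type_changed = {
--         k: (old[k], new[k])
--         for k in (old_keys & new_keys)
--         if old[k] != new[k]
--     }
--
--     return added, removed, type_changed
-- ===== SOURCE B (Python) =====
-- def compare_field_maps(old, new):
--     # Deletion-based diff: consume a working copy of `new` by popping each key
--     # seen in `old`; the residue left at the end IS the `added` dict, so no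
--     # membership test against `old` and no second pass over `new` is needed.
--     remaining = dict(new)
--     removed, type_changed = {}, {}
--     for k, v in old.items():
--         if k in remaining:
--             w = remaining.pop(k)
--             if v != w:
--                 type_changed[k] = (v, w)
--         else:
--             removed[k] = v
--     return remaining, removed, type_changed
-- ===== Notes on version B (the rewrite author's own statement) =====
-- stated objective: alternative
-- what changed: Replaces the set algebra (two key sets, difference/intersection feeding three comprehensions) by a deletion-based single pass: B pops each old key out of a working copy of new, classifying it as removed or type_changed, and the residue of that copy is the added dict, so no key set and no membership test against old ever exist.
import Mathlib
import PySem

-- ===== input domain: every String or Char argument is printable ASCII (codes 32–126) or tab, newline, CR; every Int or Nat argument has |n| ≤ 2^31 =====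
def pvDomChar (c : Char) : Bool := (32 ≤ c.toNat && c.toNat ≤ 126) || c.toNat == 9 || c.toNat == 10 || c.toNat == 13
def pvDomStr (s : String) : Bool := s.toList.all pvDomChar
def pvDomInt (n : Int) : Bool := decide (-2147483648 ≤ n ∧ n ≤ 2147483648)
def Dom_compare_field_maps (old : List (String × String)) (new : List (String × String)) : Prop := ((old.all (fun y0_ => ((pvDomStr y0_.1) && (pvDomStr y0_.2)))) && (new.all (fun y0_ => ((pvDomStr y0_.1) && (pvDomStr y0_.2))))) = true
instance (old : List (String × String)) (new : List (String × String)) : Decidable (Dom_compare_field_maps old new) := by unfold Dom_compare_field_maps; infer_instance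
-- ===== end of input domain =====

-- B replaces A's set algebra by a deletion-based single pass that pops each old key out of a working copy of new, the residue being `added`; objective: alternative.


-- dict subscript m[k] on an association list modelling a dict: first match (used only where the key is present)
def fmGet (m : List (String × String)) (k : String) : String := (List.lookup k m).getD ""

-- ===== PORT A =====
def compare_field_maps (old : List (String × String)) (new : List (String × String)) : (List (String × String)) × (List (String × String)) × (List (String × String × String)) :=
  let old_keys : PySem.Set String := PySem.Set.ofList (old.map Prod.fst)
  let new_keys : PySem.Set String := PySem.Set.ofList (new.map Prod.fst)
  let added := (PySem.Set.diff new_keys old_keys).map (fun k => (k, fmGet new k))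
  let removed := (PySem.Set.diff old_keys new_keys).map (fun k => (k, fmGet old k))
  let type_changed := ((PySem.Set.inter old_keys new_keys).filter (fun k => fmGet old k != fmGet new k)).map (fun k => (k, fmGet old k, fmGet new k))
  (added, removed, type_changed)

-- ===== PORT B =====
-- remaining = dict(new); for k, v in old.items(): pop matches out of remaining,
-- classifying into removed / type_changed; leftover remaining is `added`.
-- `remaining.pop(k)` is ported by hand as first-match lookup + eraseP of the first
-- pair with that key (exact for a dict, which holds each key once).
def compare_field_maps_alt (old : List (String × String)) (new : List (String × String)) : (List (String × String)) × (List (String × String)) × (List (String × String × String)) :=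
  let res := old.foldl (fun (acc : List (String × String) × List (String × String) × List (String × String × String)) kv =>
      if ((acc.1.map Prod.fst).contains kv.1) then
        let w := fmGet acc.1 kv.1
        let remaining' := acc.1.eraseP (fun p => p.1 == kv.1)
        if kv.2 != w then (remaining', acc.2.1, acc.2.2 ++ [(kv.1, kv.2, w)])
        else (remaining', acc.2.1, acc.2.2)
      else (acc.1, acc.2.1 ++ [kv], acc.2.2)) (new, [], [])
  res

-- ===== PRECONDITION & SPEC =====
-- Pre_ requires each association list to carry pairwise-distinct keys: the arguments model Python dicts,
-- which cannot hold duplicate keys, so this excludes no input the Python function can receive.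
def Pre_compare_field_maps (old : List (String × String)) (new : List (String × String)) : Prop :=
  (old.map Prod.fst).Nodup ∧ (new.map Prod.fst).Nodup
instance (old : List (String × String)) (new : List (String × String)) : Decidable (Pre_compare_field_maps old new) := by unfold Pre_compare_field_maps; infer_instance
def pvWitness_compare_field_maps : (List (String × String)) × (List (String × String)) :=
  ([("a", "int"), ("b", "str")], [("b", "text"), ("c", "bool")])

def Spec_compare_field_maps (old : List (String × String)) (new : List (String × String)) (out : (List (String × String)) × (List (String × String)) × (List (String × String × String))) : Prop := out = compare_field_maps_alt old new
instance (old : List (String × String)) (new : List (String × String)) (out : (List (String × String)) × (List (String × String)) × (List (String × String × String))) : Decidable (Spec_compare_field_maps old new out) := by unfold Spec_compare_field_maps; infer_instance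

-- ===== CLAIM (what is proved, stated in full; the proofs are below) =====
def Claim_equal_compare_field_maps : Prop := ∀ (old : List (String × String)) (new : List (String × String)), Dom_compare_field_maps old new → Pre_compare_field_maps old new → Spec_compare_field_maps old new (compare_field_maps old new)

-- ===== LEMMAS AND PROOFS =====

theorem fmGet_cons (k v x : String) (t : List (String × String)) :
    fmGet ((k, v) :: t) x = if x == k then v else fmGet t x := by
  simp only [fmGet, List.lookup]
  by_cases h : x == k <;> simp [h]

-- filter over the key list (with each key's looked-up value) fuses into a filter-map over the pairs,
-- provided the keys are distinct
theorem fuse {γ : Type} (m : List (String × String)) (hnd : (m.map Prod.fst).Nodup)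
    (p : String → String → Bool) (g : String → String → γ) :
    ((m.map Prod.fst).filter (fun k => p k (fmGet m k))).map (fun k => g k (fmGet m k))
      = (m.filter (fun kv => p kv.1 kv.2)).map (fun kv => g kv.1 kv.2) := by
  induction m with
  | nil => rfl
  | cons a t ih =>
    obtain ⟨k0, v0⟩ := a
    simp only [List.map_cons, List.nodup_cons] at hnd ⊢
    obtain ⟨hk0, ht⟩ := hnd
    have hget0 : fmGet ((k0, v0) :: t) k0 = v0 := by simp [fmGet_cons]
    have hgett : ∀ x ∈ t.map Prod.fst, fmGet ((k0, v0) :: t) x = fmGet t x := by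
      intro x hx
      rw [fmGet_cons]
      have : ¬ (x == k0) = true := by
        simp only [beq_iff_eq]; rintro rfl; exact hk0 hx
      simp [this]
    have hfilter : (t.map Prod.fst).filter (fun k => p k (fmGet ((k0, v0) :: t) k)) =
        (t.map Prod.fst).filter (fun k => p k (fmGet t k)) := by
      apply List.filter_congr
      intro x hx; rw [hgett x hx]
    have hmap : ∀ l : List String, (∀ x ∈ l, x ∈ t.map Prod.fst) →
        l.map (fun k => g k (fmGet ((k0, v0) :: t) k)) = l.map (fun k => g k (fmGet t k)) := by
      intro l hl
      apply List.map_congr_left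
      intro x hx; rw [hgett x (hl x hx)]
    rw [List.filter_cons, List.filter_cons]
    by_cases hp : p k0 (fmGet ((k0, v0) :: t) k0) = true
    · rw [hget0] at hp
      simp only [hget0, hp, if_pos]
      rw [List.map_cons, hget0, hfilter,
        hmap _ (fun x hx => List.mem_of_mem_filter hx), ih ht]
      rfl
    · rw [hget0] at hp
      simp only [hget0, hp]
      rw [if_neg (c := (false = true)) (by decide), if_neg (c := (false = true)) (by decide), hfilter,
        hmap _ (fun x hx => List.mem_of_mem_filter hx), ih ht]

-- erasing the (unique) pair with key k does not change key membership or lookup for other keys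
theorem contains_eraseP (l : List (String × String)) (k x : String) (hx : x ≠ k) :
    (((l.eraseP (fun p => p.1 == k)).map Prod.fst).contains x) = ((l.map Prod.fst).contains x) := by
  induction l with
  | nil => rfl
  | cons a t ih =>
    by_cases h : (a.1 == k) = true
    · have hak : a.1 = k := by simpa using h
      have hne : (x == a.1) = false := by rw [hak]; simp [hx]
      simp only [List.eraseP_cons, h, cond_true, List.map_cons, List.contains_cons, hne,
        Bool.false_or]
    · have h' : (a.1 == k) = false := by revert h; cases (a.1 == k) <;> simp
      simp only [List.eraseP_cons, h', cond_false, List.map_cons, List.contains_cons]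
      rw [ih]

theorem fmGet_eraseP (l : List (String × String)) (k x : String) (hx : x ≠ k) :
    fmGet (l.eraseP (fun p => p.1 == k)) x = fmGet l x := by
  induction l with
  | nil => rfl
  | cons a t ih =>
    obtain ⟨ka, va⟩ := a
    by_cases h : (ka == k) = true
    · have hak : ka = k := by simpa using h
      have hne : (x == ka) = false := by rw [hak]; simp [hx]
      simp only [List.eraseP_cons, h, cond_true]
      rw [fmGet_cons, hne]
      simp
    · have h' : (ka == k) = false := by revert h; cases (ka == k) <;> simp
      simp only [List.eraseP_cons, h', cond_false]
      rw [fmGet_cons, fmGet_cons, ih]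

-- filtering the erased list against the remaining keys = filtering the full list against k :: keys
-- (needs distinct keys in l so that eraseP removes every pair with key k)
theorem filter_eraseP (l : List (String × String)) (hnd : (l.map Prod.fst).Nodup)
    (k : String) (keys : List String) :
    (l.eraseP (fun p => p.1 == k)).filter (fun kv => !(keys.contains kv.1))
      = l.filter (fun kv => !((k :: keys).contains kv.1)) := by
  induction l with
  | nil => rfl
  | cons a t ih =>
    simp only [List.map_cons, List.nodup_cons] at hnd
    obtain ⟨hk0, ht⟩ := hnd
    by_cases h : (a.1 == k) = true
    · have hak : a.1 = k := by simpa using h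
      have hdrop : (!((k :: keys).contains a.1)) = false := by
        simp [hak]
      simp only [List.eraseP_cons, h, cond_true, List.filter_cons, hdrop]
      rw [if_neg (by decide)]
      -- no pair of t has key k, so membership in k :: keys reduces to membership in keys
      apply List.filter_congr
      intro kv hkv
      have hne : kv.1 ≠ k := by
        intro hcon
        exact hk0 (by rw [hak, ← hcon]; exact List.mem_map_of_mem hkv)
      simp [hne]
    · have h' : (a.1 == k) = false := by revert h; cases (a.1 == k) <;> simp
      have hak : a.1 ≠ k := by simpa using h'
      have hsame : (!((k :: keys).contains a.1)) = (!(keys.contains a.1)) := by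
        simp [hak]
      simp only [List.eraseP_cons, h', cond_false, List.filter_cons, hsame]
      rw [ih ht]

-- B's loop, with generalized accumulators, computes three filters of its inputs
theorem loop (old : List (String × String)) (rem : List (String × String))
    (racc : List (String × String)) (cacc : List (String × String × String))
    (hro : (old.map Prod.fst).Nodup) (hrn : (rem.map Prod.fst).Nodup) :
    old.foldl (fun (acc : List (String × String) × List (String × String) × List (String × String × String)) kv =>
      if ((acc.1.map Prod.fst).contains kv.1) then
        let w := fmGet acc.1 kv.1
        let remaining' := acc.1.eraseP (fun p => p.1 == kv.1)
        if kv.2 != w then (remaining', acc.2.1, acc.2.2 ++ [(kv.1, kv.2, w)])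
        else (remaining', acc.2.1, acc.2.2)
      else (acc.1, acc.2.1 ++ [kv], acc.2.2)) (rem, racc, cacc)
    = (rem.filter (fun kv => !((old.map Prod.fst).contains kv.1)),
       racc ++ old.filter (fun kv => !((rem.map Prod.fst).contains kv.1)),
       cacc ++ (old.filter (fun kv => ((rem.map Prod.fst).contains kv.1) && (kv.2 != fmGet rem kv.1))).map
         (fun kv => (kv.1, kv.2, fmGet rem kv.1))) := by
  induction old generalizing rem racc cacc with
  | nil => simp
  | cons kv t ih =>
    obtain ⟨k, v⟩ := kv
    simp only [List.map_cons, List.nodup_cons] at hro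
    obtain ⟨hkt, htnd⟩ := hro
    have hkey_ne : ∀ x ∈ t, x.1 ≠ k := by
      intro x hx hcon
      exact hkt (by rw [← hcon]; exact List.mem_map_of_mem hx)
    rw [List.foldl_cons]
    by_cases hc : ((rem.map Prod.fst).contains k) = true
    · -- k present in remaining: pop it
      have hrn' : ((rem.eraseP (fun (p : String × String) => p.1 == k)).map Prod.fst).Nodup :=
        ((List.eraseP_sublist (l := rem) (p := fun p => p.1 == k)).map Prod.fst).nodup hrn
      -- the three components after the IH, rewritten back to `rem`
      have hadd : (rem.eraseP (fun p => p.1 == k)).filter (fun kv => !((t.map Prod.fst).contains kv.1))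
          = rem.filter (fun kv => !(((k :: t.map Prod.fst)).contains kv.1)) :=
        filter_eraseP rem hrn k (t.map Prod.fst)
      have hremv : t.filter (fun kv => !(((rem.eraseP (fun p => p.1 == k)).map Prod.fst).contains kv.1))
          = t.filter (fun kv => !((rem.map Prod.fst).contains kv.1)) := by
        apply List.filter_congr
        intro x hx
        rw [contains_eraseP rem k x.1 (hkey_ne x hx)]
      have hchf : t.filter (fun kv => (((rem.eraseP (fun p => p.1 == k)).map Prod.fst).contains kv.1) && (kv.2 != fmGet (rem.eraseP (fun p => p.1 == k)) kv.1))
          = t.filter (fun kv => ((rem.map Prod.fst).contains kv.1) && (kv.2 != fmGet rem kv.1)) := by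
        apply List.filter_congr
        intro x hx
        rw [contains_eraseP rem k x.1 (hkey_ne x hx), fmGet_eraseP rem k x.1 (hkey_ne x hx)]
      have hchm : ∀ l : List (String × String), (∀ x ∈ l, x ∈ t) →
          l.map (fun kv => (kv.1, kv.2, fmGet (rem.eraseP (fun p => p.1 == k)) kv.1))
            = l.map (fun kv => (kv.1, kv.2, fmGet rem kv.1)) := by
        intro l hl
        apply List.map_congr_left
        intro x hx
        rw [fmGet_eraseP rem k x.1 (hkey_ne x (hl x hx))]
      by_cases hv : (v != fmGet rem k) = true
      · rw [if_pos hc, if_pos hv]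
        rw [ih _ _ _ htnd hrn']
        refine congrArg₂ Prod.mk ?_ (congrArg₂ Prod.mk ?_ ?_)
        · rw [hadd]; rfl
        · rw [hremv, List.filter_cons]
          have hnb : (!((rem.map Prod.fst).contains k)) = false := by rw [hc]; rfl
          rw [if_neg (by rw [hnb]; decide)]
        · rw [hchf, hchm _ (fun x hx => List.mem_of_mem_filter hx), List.filter_cons]
          rw [if_pos (by rw [hc, hv]; rfl)]
          simp [List.append_assoc]
      · have hv' : (v != fmGet rem k) = false := by
          revert hv; cases (v != fmGet rem k) <;> simp
        rw [if_pos hc, if_neg (by rw [hv']; decide)]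
        rw [ih _ _ _ htnd hrn']
        refine congrArg₂ Prod.mk ?_ (congrArg₂ Prod.mk ?_ ?_)
        · rw [hadd]; rfl
        · rw [hremv, List.filter_cons]
          have hnb : (!((rem.map Prod.fst).contains k)) = false := by rw [hc]; rfl
          rw [if_neg (by rw [hnb]; decide)]
        · rw [hchf, hchm _ (fun x hx => List.mem_of_mem_filter hx), List.filter_cons]
          rw [if_neg (by rw [hc, hv']; decide)]
    · -- k absent from remaining: goes to removed
      have hc' : ((rem.map Prod.fst).contains k) = false := by
        revert hc; cases ((rem.map Prod.fst).contains k) <;> simp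
      rw [if_neg hc, ih _ _ _ htnd hrn]
      have hremk : ∀ x ∈ rem, x.1 ≠ k := by
        intro x hx hcon
        have : ((rem.map Prod.fst).contains k) = true := by
          simp only [List.contains_eq_mem, decide_eq_true_eq]
          exact hcon ▸ List.mem_map_of_mem hx
        rw [hc'] at this; exact absurd this (by decide)
      refine congrArg₂ Prod.mk ?_ (congrArg₂ Prod.mk ?_ ?_)
      · apply List.filter_congr
        intro x hx
        simp [hremk x hx]
      · rw [List.filter_cons, if_pos (by rw [hc']; rfl)]
        simp [List.append_assoc]
      · rw [List.filter_cons, if_neg (by rw [hc']; simp)]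

-- ===== VERDICT (by name: the statement is the Claim_ definition above) =====
theorem compare_field_maps_spec : Claim_equal_compare_field_maps := by
  intro old new _ hpre
  obtain ⟨ho, hn⟩ := hpre
  show _ = compare_field_maps_alt old new
  unfold compare_field_maps compare_field_maps_alt
  rw [loop old new [] [] ho hn,
    PySem.Set.ofList_eq_self_of_nodup _ ho, PySem.Set.ofList_eq_self_of_nodup _ hn]
  simp only [List.nil_append]
  refine congrArg₂ Prod.mk ?_ (congrArg₂ Prod.mk ?_ ?_)
  · simpa [PySem.Set.diff] using
      fuse new hn (fun k _ => !((old.map Prod.fst).contains k)) (fun k v => (k, v))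
  · simpa [PySem.Set.diff] using
      fuse old ho (fun k _ => !((new.map Prod.fst).contains k)) (fun k v => (k, v))
  · have h := (fuse old ho (fun k v => (v != fmGet new k) && ((new.map Prod.fst).contains k))
      (fun k v => (k, v, fmGet new k))).trans
      (congrArg _ (List.filter_congr (fun kv _ => Bool.and_comm _ _)))
    simpa [PySem.Set.inter, List.filter_filter, Bool.and_comm] using h
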